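-- pv_equiv track=rewrite | github.com/TommyHerbert/ox-ui | utils/case.py | _tokenise_headline
-- ===== SOURCE A (Python) =====
-- caps = 'ABCDEFGHIJKLMNOPQRSTUVWXYZ'
--
-- def _tokenise_headline(headline_input):
--     remaining_input = headline_input
--     tokens = []
--     while remaining_input:
--         parts = _split_headline(remaining_input)
--         tokens.append(parts[0])
--         remaining_input = parts[1]
--     return tokens
--
-- def _split_headline(headline_input):
--     if len(headline_input) == 1:
--         return headline_input, None
--     for i in range(1, len(headline_input)):
--         if headline_input[i] in caps:
--             return headline_input[:i], headline_input[i:]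
--     return headline_input, None
-- ===== SOURCE B (Python) =====
-- caps = 'ABCDEFGHIJKLMNOPQRSTUVWXYZ'
--
-- def _tokenise_headline(headline_input):
--     if not headline_input:
--         return []
--     tokens = []
--     current = headline_input[0]
--     for ch in headline_input[1:]:
--         if ch in caps:
--             tokens.append(current)
--             current = ch
--         else:
--             current += ch
--     tokens.append(current)
--     return tokens
-- ===== Notes on version B (the rewrite author's own statement) =====
-- stated objective: simpler
-- what changed: Replaced the while-loop that repeatedly calls a suffix-splitting helper (rescanning each remaining suffix and threading a None sentinel) with a single forward pass that accumulates the current token and flushes it at each capital letter.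
import Mathlib
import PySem

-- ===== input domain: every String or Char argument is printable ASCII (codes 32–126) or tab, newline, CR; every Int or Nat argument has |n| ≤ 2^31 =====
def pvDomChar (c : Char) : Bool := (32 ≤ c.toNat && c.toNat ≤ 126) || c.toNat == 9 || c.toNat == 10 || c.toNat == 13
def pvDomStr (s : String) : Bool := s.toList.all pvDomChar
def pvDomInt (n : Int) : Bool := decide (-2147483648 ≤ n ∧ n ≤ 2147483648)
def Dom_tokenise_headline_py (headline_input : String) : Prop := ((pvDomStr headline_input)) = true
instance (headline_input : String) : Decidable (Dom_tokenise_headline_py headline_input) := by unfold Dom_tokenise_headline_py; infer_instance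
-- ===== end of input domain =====

-- B replaces A's repeated suffix-splitting helper (with its None sentinel) by one
-- accumulating forward pass over the characters; objective: simpler.


-- ===== PORT A =====
-- caps = 'ABCDEFGHIJKLMNOPQRSTUVWXYZ'; `ch in caps` for a single character
def pvCapsA (c : Char) : Bool := ("ABCDEFGHIJKLMNOPQRSTUVWXYZ".toList).contains c

-- the `for i in range(1, len)` scan of _split_headline, starting from index i
def pvSplitLoopA (s : List Char) (i : Nat) : List Char × Option (List Char) :=
  if h : i < s.length then
    if pvCapsA s[i] then (s.take i, some (s.drop i))
    else pvSplitLoopA s (i + 1)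
  else (s, none)
termination_by s.length - i

-- _split_headline
def pvSplitA (s : List Char) : List Char × Option (List Char) :=
  if s.length = 1 then (s, none) else pvSplitLoopA s 1

lemma pvSplitLoopA_eq (s : List Char) : ∀ (i : Nat),
    pvSplitLoopA s i =
      (s.take (i + ((s.drop i).takeWhile (fun c => !pvCapsA c)).length),
       if i + ((s.drop i).takeWhile (fun c => !pvCapsA c)).length < s.length
       then some (s.drop (i + ((s.drop i).takeWhile (fun c => !pvCapsA c)).length))
       else none) := by
  intro i
  induction hm : s.length - i using Nat.strong_induction_on generalizing i with
  | _ m ih =>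
    rw [pvSplitLoopA]
    by_cases h1 : i < s.length
    · have hd : s.drop i = s[i] :: s.drop (i + 1) := (List.getElem_cons_drop h1).symm
      rw [dif_pos h1]
      by_cases h2 : pvCapsA s[i]
      · rw [if_pos h2, hd, List.takeWhile_cons]
        simp [h2, h1]
      · rw [if_neg h2]
        rw [ih (s.length - (i + 1)) (by omega) (i + 1) rfl]
        rw [hd, List.takeWhile_cons]
        simp only [h2, Bool.not_false, if_true, List.length_cons]
        have : i + (((s.drop (i + 1)).takeWhile (fun c => !pvCapsA c)).length + 1)
             = i + 1 + ((s.drop (i + 1)).takeWhile (fun c => !pvCapsA c)).length := by omega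
        rw [this]
    · rw [dif_neg h1]
      have hi : s.length ≤ i := Nat.le_of_not_lt h1
      have hd : s.drop i = [] := List.drop_eq_nil_of_le hi
      rw [hd]
      simp only [List.takeWhile_nil, List.length_nil, Nat.add_zero]
      rw [List.take_of_length_le hi, if_neg (by omega)]

lemma pvSplitA_some_lt (s t : List Char) (h : (pvSplitA s).2 = some t) :
    t.length < s.length := by
  unfold pvSplitA at h
  split at h
  · simp at h
  · rw [pvSplitLoopA_eq] at h
    split at h
    · rename_i hlt
      simp only [Option.some.injEq] at h
      subst h
      simp only [List.length_drop]
      omega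
    · simp at h

-- _tokenise_headline's while loop over the remaining input
def pvTokLoopA (s : List Char) : List String :=
  if s = [] then [] else
    match hp : (pvSplitA s).2 with
    | none => [(pvSplitA s).1.asString]
    | some t => (pvSplitA s).1.asString :: pvTokLoopA t
termination_by s.length
decreasing_by exact pvSplitA_some_lt s t hp

def tokenise_headline_py (headline_input : String) : List String :=
  pvTokLoopA headline_input.toList

-- ===== PORT B =====
def pvCapsB (c : Char) : Bool := ("ABCDEFGHIJKLMNOPQRSTUVWXYZ".toList).contains c

-- B's single forward pass: fold over the tail with state (tokens, current)
def pvStepB (acc : List String × List Char) (ch : Char) : List String × List Char :=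
  if pvCapsB ch then (acc.1 ++ [acc.2.asString], [ch]) else (acc.1, acc.2 ++ [ch])

def tokenise_headline_py_alt (headline_input : String) : List String :=
  match headline_input.toList with
  | [] => []
  | c :: rest =>
    let p := rest.foldl pvStepB ([], [c])
    p.1 ++ [p.2.asString]

-- ===== PRECONDITION & SPEC =====
def Spec_tokenise_headline_py (headline_input : String) (out : List String) : Prop := out = tokenise_headline_py_alt headline_input
instance (headline_input : String) (out : List String) : Decidable (Spec_tokenise_headline_py headline_input out) := by unfold Spec_tokenise_headline_py; infer_instance

-- ===== CLAIM (what is proved, stated in full; the proofs are below) =====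
def Claim_equal_tokenise_headline_py : Prop := ∀ (headline_input : String), Dom_tokenise_headline_py headline_input → Spec_tokenise_headline_py headline_input (tokenise_headline_py headline_input)

-- ===== LEMMAS AND PROOFS =====

-- canonical forward-recursive tokeniser used to bridge the two ports
def pvGo (cur : List Char) : List Char → List String
  | [] => [cur.asString]
  | c :: r => if pvCapsA c then cur.asString :: pvGo [c] r else pvGo (cur ++ [c]) r

lemma foldB_go (rest : List Char) : ∀ (ts : List String) (cur : List Char),
    (rest.foldl pvStepB (ts, cur)).1 ++ [(rest.foldl pvStepB (ts, cur)).2.asString]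
      = ts ++ pvGo cur rest := by
  induction rest with
  | nil => intro ts cur; simp [pvGo]
  | cons c r ih =>
    intro ts cur
    simp only [List.foldl_cons, pvStepB, pvGo]
    by_cases hc : pvCapsB c
    · have hc' : pvCapsA c := hc
      simp [hc, hc', ih]
    · have hc' : ¬ pvCapsA c := hc
      simp [hc, hc', ih]

lemma go_spec (rest : List Char) : ∀ cur : List Char,
    pvGo cur rest = (cur ++ rest.takeWhile (fun c => !pvCapsA c)).asString ::
      (match rest.dropWhile (fun c => !pvCapsA c) with
       | [] => []
       | c :: r => pvGo [c] r) := by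
  induction rest with
  | nil => intro cur; simp [pvGo]
  | cons c r ih =>
    intro cur
    by_cases hc : pvCapsA c
    · simp [pvGo, hc]
    · simp only [pvGo, hc, List.takeWhile_cons, List.dropWhile_cons]
      simp only [Bool.not_false, if_true, if_false, Bool.false_eq_true]
      rw [ih]
      simp

lemma take_takeWhile (p : Char → Bool) (l : List Char) :
    l.take (l.takeWhile p).length = l.takeWhile p :=
  (List.prefix_iff_eq_take.mp (List.takeWhile_prefix p)).symm

lemma drop_takeWhile (p : Char → Bool) (l : List Char) :
    l.drop (l.takeWhile p).length = l.dropWhile p := by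
  nth_rewrite 2 [← List.takeWhile_append_dropWhile (p := p) (l := l)]
  rw [List.drop_append_of_le_length (Nat.le_refl _)]
  simp

lemma tokA_eq_go (s : List Char) : pvTokLoopA s =
    (match s with | [] => [] | c :: rest => pvGo [c] rest) := by
  induction hn : s.length using Nat.strong_induction_on generalizing s with
  | _ n ih =>
    match s with
    | [] => rw [pvTokLoopA]; simp
    | [c] =>
      have hs : pvSplitA [c] = ([c], none) := by simp [pvSplitA]
      rw [pvTokLoopA]
      rw [if_neg (by simp)]
      split
      · simp [hs, pvGo]
      · rename_i t hp
        rw [hs] at hp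
        simp at hp
    | c :: d :: rest =>
      rw [pvTokLoopA]
      rw [if_neg (by simp)]
      set tl := d :: rest with htl
      have hlen : (c :: tl).length ≠ 1 := by simp [htl]
      have hsplit : pvSplitA (c :: tl) =
          ((c :: tl).take (1 + (tl.takeWhile (fun x => !pvCapsA x)).length),
           if 1 + (tl.takeWhile (fun x => !pvCapsA x)).length < (c :: tl).length
           then some ((c :: tl).drop (1 + (tl.takeWhile (fun x => !pvCapsA x)).length))
           else none) := by
        unfold pvSplitA
        rw [if_neg hlen, pvSplitLoopA_eq]
        simp
      have htake : (c :: tl).take (1 + (tl.takeWhile (fun x => !pvCapsA x)).length)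
          = c :: tl.takeWhile (fun x => !pvCapsA x) := by
        rw [Nat.add_comm, List.take_succ_cons, take_takeWhile]
      have hdrop : (c :: tl).drop (1 + (tl.takeWhile (fun x => !pvCapsA x)).length)
          = tl.dropWhile (fun x => !pvCapsA x) := by
        have : (1 + (tl.takeWhile (fun x => !pvCapsA x)).length)
             = (tl.takeWhile (fun x => !pvCapsA x)).length + 1 := by omega
        rw [this, List.drop_succ_cons, drop_takeWhile]
      show _ = pvGo [c] tl
      rw [go_spec]
      split
      · -- A's split returned (token, None): all of tl is non-caps
        rename_i hp
        rw [hsplit] at hp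
        simp only at hp
        split at hp
        · simp at hp
        · rename_i hge
          have h1 : (tl.takeWhile (fun x => !pvCapsA x)).length = tl.length := by
            have := (List.takeWhile_prefix (l := tl) (fun x => !pvCapsA x)).length_le
            simp only [List.length_cons] at hge
            omega
          have hdw : tl.dropWhile (fun x => !pvCapsA x) = [] := by
            have h2 := congrArg List.length (drop_takeWhile (fun x => !pvCapsA x) tl)
            simp only [List.length_drop, h1, Nat.sub_self] at h2
            exact List.length_eq_zero_iff.mp h2.symm
          have htw : tl.takeWhile (fun x => !pvCapsA x) = tl :=
            List.IsPrefix.eq_of_length (List.takeWhile_prefix _) h1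
          rw [hsplit]
          simp [htw, hdw]
          rw [List.take_of_length_le (by simp [Nat.add_comm])]
      · -- A's split returned (token, suffix): recurse
        rename_i t hp
        rw [hsplit] at hp
        simp only at hp
        split at hp
        · rename_i hlt
          simp only [Option.some.injEq] at hp
          rw [hsplit]
          simp only [htake]
          have ht : t = tl.dropWhile (fun x => !pvCapsA x) := by rw [← hp, hdrop]
          have hdw : tl.dropWhile (fun x => !pvCapsA x) ≠ [] := by
            intro hcon
            have h2 := congrArg List.length hdrop
            rw [hcon] at h2
            simp only [List.length_drop, List.length_nil, List.length_cons] at h2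
            simp only [List.length_cons] at hlt
            omega
          match hdw2 : tl.dropWhile (fun x => !pvCapsA x) with
          | [] => exact absurd hdw2 hdw
          | e :: r2 =>
            have hrec : pvTokLoopA (e :: r2) = pvGo [e] r2 := by
              have hlt2 : (e :: r2).length < n := by
                have h3 : (e :: r2).length ≤ tl.length := by
                  rw [← hdw2, ← drop_takeWhile]
                  simp
                have hn' : n = tl.length + 1 := by simp [← hn]
                rw [hn']
                exact Nat.lt_succ_of_le h3
              exact ih _ hlt2 _ rfl
            rw [ht, hdw2, hrec]
            simp
        · simp at hp

-- ===== VERDICT (by name: the statement is the Claim_ definition above) =====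
theorem tokenise_headline_py_spec : Claim_equal_tokenise_headline_py := by
  intro s _
  unfold Spec_tokenise_headline_py tokenise_headline_py tokenise_headline_py_alt
  rw [tokA_eq_go]
  match h : s.toList with
  | [] => simp
  | c :: rest =>
    simp only []
    rw [foldB_go]
    simp
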